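-- pv_equiv track=rewrite | github.com/voonya/Labs_Python | Lab 9/func.py | check_repeat
-- ===== SOURCE A (Python) =====
-- def check_repeat(list_words):
--     length = len(list_words)
--     list_to_del = []
--     for i in range(length-1):
--         for k in range(i+1,length):
--             if list_words[i] == list_words[k]:
--                list_to_del.append(list_words[i])
--     return list_to_del
-- ===== SOURCE B (Python) =====
-- def check_repeat(list_words):
--     counts = {}
--     rev_chunks = []
--     for w in reversed(list_words):
--         c = counts.get(w, 0)
--         rev_chunks.append([w] * c)
--         counts[w] = c + 1
--     out = []
--     for chunk in reversed(rev_chunks):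
--         out.extend(chunk)
--     return out
-- ===== Notes on version B (the rewrite author's own statement) =====
-- stated objective: alternative
-- what changed: Replaces the O(n^2) nested index scan with one right-to-left pass that keeps suffix occurrence counts in a dict and emits count copies per position (comparisons drop from O(n^2) to O(n), though the output itself can be quadratic).
import Mathlib
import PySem

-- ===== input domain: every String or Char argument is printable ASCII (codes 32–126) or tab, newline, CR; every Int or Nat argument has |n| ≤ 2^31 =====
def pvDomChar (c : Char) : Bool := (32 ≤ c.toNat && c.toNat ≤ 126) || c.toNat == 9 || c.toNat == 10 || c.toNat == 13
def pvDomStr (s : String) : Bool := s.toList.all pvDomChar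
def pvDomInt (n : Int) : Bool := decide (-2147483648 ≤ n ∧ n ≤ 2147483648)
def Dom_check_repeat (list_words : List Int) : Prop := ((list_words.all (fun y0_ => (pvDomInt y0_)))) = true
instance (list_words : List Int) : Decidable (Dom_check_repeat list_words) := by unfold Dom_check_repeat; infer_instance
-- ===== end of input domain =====

-- B replaces A's nested index scan by one right-to-left pass keeping suffix
-- occurrence counts in a dict (objective: alternative single-pass algorithm).

-- ===== PORT A =====
-- inner loop 'for k in range(i+1, length): if list_words[i]==list_words[k]: append'
def aInner (x : Int) (rest : List Int) (acc : List Int) : List Int :=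
  rest.foldl (fun a k => if x == k then a ++ [x] else a) acc
-- outer loop over i: position i is the head, positions i+1.. are the tail
def aOuter : List Int → List Int → List Int
  | [], acc => acc
  | x :: rest, acc => aOuter rest (aInner x rest acc)

def check_repeat (list_words : List Int) : List Int :=
  aOuter list_words []

-- ===== PORT B =====
-- one step of B's right-to-left pass: state = (rev_chunks, counts)
def bStep (st : List (List Int) × PySem.Dict Int Int) (w : Int) :
    List (List Int) × PySem.Dict Int Int :=
  let c := st.2.getD w 0
  (st.1 ++ [List.replicate c.toNat w], st.2.insert w (c + 1))

def check_repeat_alt (list_words : List Int) : List Int :=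
  let st := list_words.reverse.foldl bStep ([], PySem.Dict.empty)
  st.1.reverse.foldl (fun out chunk => out ++ chunk) []

-- ===== PRECONDITION & SPEC =====
def Spec_check_repeat (list_words : List Int) (out : List Int) : Prop := out = check_repeat_alt list_words
instance (list_words : List Int) (out : List Int) : Decidable (Spec_check_repeat list_words out) := by unfold Spec_check_repeat; infer_instance

-- ===== CLAIM (what is proved, stated in full; the proofs are below) =====
def Claim_equal_check_repeat : Prop := ∀ (list_words : List Int), Dom_check_repeat list_words → Spec_check_repeat list_words (check_repeat list_words)

-- ===== LEMMAS AND PROOFS =====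

-- reference: for each position, count-in-suffix copies of the element
def refRep : List Int → List Int
  | [] => []
  | x :: rest => List.replicate (rest.count x) x ++ refRep rest

lemma aInner_eq (x : Int) (rest : List Int) : ∀ acc,
    aInner x rest acc = acc ++ List.replicate (rest.count x) x := by
  induction rest with
  | nil => intro acc; simp [aInner]
  | cons k rest ih =>
    intro acc
    simp only [aInner, List.foldl_cons] at *
    rw [ih]
    by_cases h : x = k
    · subst h
      simp [List.replicate_succ]
    · have hb : (x == k) = false := by simp [h]
      have hb' : (k == x) = false := by simp [Ne.symm h]
      simp [hb, hb', List.count_cons]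

lemma aOuter_eq : ∀ (xs acc : List Int), aOuter xs acc = acc ++ refRep xs := by
  intro xs
  induction xs with
  | nil => intro acc; simp [aOuter, refRep]
  | cons x rest ih =>
    intro acc
    simp only [aOuter, refRep]
    rw [ih, aInner_eq]
    simp

lemma check_repeat_eq_ref (xs : List Int) : check_repeat xs = refRep xs := by
  simpa using aOuter_eq xs []

-- chunks produced by B's pass starting from dict d, in ORIGINAL order
def srecD (d : PySem.Dict Int Int) : List Int → List (List Int)
  | [] => []
  | x :: rest => List.replicate (d.getD x 0 + (rest.count x : Int)).toNat x :: srecD d rest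

lemma bLoop_eq (xs : List Int) : ∀ (chunks : List (List Int)) (d : PySem.Dict Int Int),
    (xs.reverse.foldl bStep (chunks, d)).1 = chunks ++ (srecD d xs).reverse
    ∧ ∀ w, (xs.reverse.foldl bStep (chunks, d)).2.getD w 0 = d.getD w 0 + (xs.count w : Int) := by
  induction xs with
  | nil => intro chunks d; simp [srecD]
  | cons x rest ih =>
    intro chunks d
    have hfold : (x :: rest).reverse.foldl bStep (chunks, d)
        = bStep (rest.reverse.foldl bStep (chunks, d)) x := by
      simp [List.foldl_append]
    obtain ⟨ih1, ih2⟩ := ih chunks d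
    constructor
    · rw [hfold]
      simp only [bStep, ih1, ih2 x, srecD, List.reverse_cons]
      simp
    · intro w
      rw [hfold]
      simp only [bStep, ih2 x]
      rw [PySem.Dict.getD_insert]
      by_cases h : w = x
      · subst h
        rw [if_pos rfl]
        have hc : (w :: rest).count w = rest.count w + 1 := by
          simp
        rw [hc]
        push_cast
        ring
      · rw [if_neg h, ih2 w]
        simp only [List.count_cons]
        have hb : (x == w) = false := by
          simp
          exact fun hh => h hh.symm
        simp [hb]

lemma foldl_app_eq (l : List (List Int)) : ∀ acc,
    l.foldl (fun out chunk => out ++ chunk) acc = acc ++ l.flatten := by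
  induction l with
  | nil => intro acc; simp
  | cons c l ih => intro acc; simp [ih, List.flatten_cons]

lemma srecD_empty_flatten (xs : List Int) :
    (srecD PySem.Dict.empty xs).flatten = refRep xs := by
  induction xs with
  | nil => simp [srecD, refRep]
  | cons x rest ih =>
    simp [srecD, refRep, ih, PySem.Dict.getD_empty]

lemma check_repeat_alt_eq_ref (xs : List Int) : check_repeat_alt xs = refRep xs := by
  unfold check_repeat_alt
  obtain ⟨h1, _⟩ := bLoop_eq xs [] PySem.Dict.empty
  simp only [h1, List.nil_append, List.reverse_reverse]
  rw [foldl_app_eq, srecD_empty_flatten]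
  simp

-- ===== VERDICT (by name: the statement is the Claim_ definition above) =====
theorem check_repeat_spec : Claim_equal_check_repeat := by
  intro xs _
  unfold Spec_check_repeat
  rw [check_repeat_eq_ref, check_repeat_alt_eq_ref]
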